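-- pv_equiv track=rewrite | github.com/MichalisPanayides/AmbulanceDecisionGame | src/ambulance_game/markov/additional.py | reset_L_and_R_in_array
-- ===== SOURCE A (Python) =====
-- def reset_L_and_R_in_array(edges, lefts):
--     """
--     Take an array and re-sorts the values in such a way such that:
--     - All "D" values remain in the exact same position
--     - In the remaining spaces, "L" and "R" are sorted starting from the left with all "L"
--
--     Example
--     -----------
--     Input: [D, R, R, D, L, L, L]
--     Output: [D, L, L, D, L, R, R]
--     """
--
--     L_count = 0
--     for pos, element in enumerate(edges):
--         reset_this_entry = element == "L" or element == "R"
--         if reset_this_entry and L_count < lefts: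
--             edges[pos] = "L"
--             L_count += 1
--         elif reset_this_entry:
--             edges[pos] = "R"
--     return edges
-- ===== SOURCE B (Python) =====
-- def reset_L_and_R_in_array(edges, lefts):
--     # Fill from the RIGHT using the complement count: first compute how many
--     # mutable slots must end up "R", then sweep backwards assigning "R" to the
--     # first `rights` slots seen and "L" to all remaining ones.
--     rights = sum(e == "L" or e == "R" for e in edges) - lefts
--     seen = 0
--     for pos in range(len(edges) - 1, -1, -1):
--         if edges[pos] == "L" or edges[pos] == "R":
--             edges[pos] = "R" if seen < rights else "L"
--             seen += 1
--     return edges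
-- ===== Notes on version B (the rewrite author's own statement) =====
-- stated objective: alternative
-- what changed: B counts the mutable 'L'/'R' slots first, derives the complement count rights = slots - lefts, and sweeps the list BACKWARDS assigning 'R' to the first rights slots seen and 'L' to the rest, instead of A's forward pass that counts the L's it writes.
import Mathlib
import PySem

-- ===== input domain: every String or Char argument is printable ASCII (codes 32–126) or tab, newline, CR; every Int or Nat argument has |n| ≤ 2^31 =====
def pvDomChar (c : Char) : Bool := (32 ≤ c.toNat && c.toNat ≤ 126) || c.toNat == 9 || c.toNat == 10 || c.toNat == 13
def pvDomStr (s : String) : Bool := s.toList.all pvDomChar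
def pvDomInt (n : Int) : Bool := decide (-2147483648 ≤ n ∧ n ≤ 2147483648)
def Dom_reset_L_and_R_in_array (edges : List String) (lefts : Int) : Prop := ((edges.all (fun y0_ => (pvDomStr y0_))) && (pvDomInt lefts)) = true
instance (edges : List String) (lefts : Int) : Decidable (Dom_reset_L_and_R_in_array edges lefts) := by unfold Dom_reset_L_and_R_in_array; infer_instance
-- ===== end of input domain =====

-- B fills from the RIGHT with the complement count (count slots, then backwards sweep assigning "R" to the first `rights` slots) instead of A's forward L-first counting pass; equivalence of the RETURN value is proved (both Pythons also mutate `edges` identically in place).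


-- ===== PORT A =====
-- A's loop: walk the list left-to-right carrying L_count; rewrite each "L"/"R" slot.
def resetA_go : List String → Int → Int → List String
  | [], _, _ => []
  | e :: rest, lcount, lefts =>
    if (e == "L" || e == "R") = true ∧ lcount < lefts then
      "L" :: resetA_go rest (lcount + 1) lefts
    else if (e == "L" || e == "R") = true then
      "R" :: resetA_go rest lcount lefts
    else
      e :: resetA_go rest lcount lefts

def reset_L_and_R_in_array (edges : List String) (lefts : Int) : List String :=
  resetA_go edges 0 lefts

-- ===== PORT B =====
-- B: sum(e == "L" or e == "R" for e in edges), ported as the structural count.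
def countSlotsB : List String → Int
  | [] => 0
  | e :: rest => (if (e == "L" || e == "R") = true then 1 else 0) + countSlotsB rest

-- B's backwards loop `for pos in range(len(edges)-1, -1, -1)`, ported as
-- structural recursion over the reversed list, carrying `seen`.
def resetB_go : List String → Int → Int → List String
  | [], _, _ => []
  | e :: rest, seen, rights =>
    if (e == "L" || e == "R") = true then
      (if seen < rights then "R" else "L") :: resetB_go rest (seen + 1) rights
    else
      e :: resetB_go rest seen rights

def reset_L_and_R_in_array_alt (edges : List String) (lefts : Int) : List String :=
  (resetB_go edges.reverse 0 (countSlotsB edges - lefts)).reverse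

-- ===== PRECONDITION & SPEC =====
def Spec_reset_L_and_R_in_array (edges : List String) (lefts : Int) (out : List String) : Prop := out = reset_L_and_R_in_array_alt edges lefts
instance (edges : List String) (lefts : Int) (out : List String) : Decidable (Spec_reset_L_and_R_in_array edges lefts out) := by unfold Spec_reset_L_and_R_in_array; infer_instance

-- ===== CLAIM (what is proved, stated in full; the proofs are below) =====
def Claim_equal_reset_L_and_R_in_array : Prop := ∀ (edges : List String) (lefts : Int), Dom_reset_L_and_R_in_array edges lefts → Spec_reset_L_and_R_in_array edges lefts (reset_L_and_R_in_array edges lefts)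

-- ===== LEMMAS AND PROOFS =====

-- Common characterization: the j-th slot (counting from j upward) gets "L" iff j < lefts.
def fillL : List String → Int → Int → List String
  | [], _, _ => []
  | e :: rest, j, lefts =>
    if (e == "L" || e == "R") = true then
      (if j < lefts then "L" else "R") :: fillL rest (j + 1) lefts
    else
      e :: fillL rest j lefts

theorem countSlotsB_append (xs ys : List String) :
    countSlotsB (xs ++ ys) = countSlotsB xs + countSlotsB ys := by
  induction xs with
  | nil => simp [countSlotsB]
  | cons e rest ih => simp only [List.cons_append, countSlotsB, ih]; ring

theorem countSlotsB_reverse (xs : List String) :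
    countSlotsB xs.reverse = countSlotsB xs := by
  induction xs with
  | nil => rfl
  | cons e rest ih =>
      simp only [List.reverse_cons, countSlotsB_append, ih, countSlotsB]
      ring

theorem fillL_append (xs ys : List String) (j lefts : Int) :
    fillL (xs ++ ys) j lefts = fillL xs j lefts ++ fillL ys (j + countSlotsB xs) lefts := by
  induction xs generalizing j with
  | nil => simp [fillL, countSlotsB]
  | cons e rest ih =>
      simp only [List.cons_append, fillL, countSlotsB]
      by_cases h : (e == "L" || e == "R") = true
      · simp only [h, if_true]
        rw [show j + ((1:Int) + countSlotsB rest) = (j + 1) + countSlotsB rest from by ring,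
          ih (j + 1)]
        simp
      · simp only [h, Bool.false_eq_true, if_false]
        rw [show j + ((0:Int) + countSlotsB rest) = j + countSlotsB rest from by ring, ih j]
        simp

-- A equals fillL: the running counter is min j (max lefts 0) when the running
-- slot index is j ≥ 0.
theorem resetA_go_eq_fillL (edges : List String) (lefts : Int) :
    ∀ (j : Int), 0 ≤ j → resetA_go edges (min j (max lefts 0)) lefts = fillL edges j lefts := by
  induction edges with
  | nil => intro j _; rfl
  | cons e rest ih =>
      intro j hj
      by_cases h : (e == "L" || e == "R") = true
      · by_cases hkl : j < lefts
        · rw [show fillL (e :: rest) j lefts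
              = (if j < lefts then "L" else "R") :: fillL rest (j + 1) lefts from by
            simp only [fillL]; rw [if_pos h]]
          rw [if_pos hkl,
            show resetA_go (e :: rest) (min j (max lefts 0)) lefts
              = "L" :: resetA_go rest (min j (max lefts 0) + 1) lefts from by
                simp only [resetA_go]; rw [if_pos ⟨h, by omega⟩],
            show min j (max lefts 0) + 1 = min (j + 1) (max lefts 0) from by omega,
            ih (j + 1) (by omega)]
        · rw [show fillL (e :: rest) j lefts
              = (if j < lefts then "L" else "R") :: fillL rest (j + 1) lefts from by
            simp only [fillL]; rw [if_pos h]]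
          rw [if_neg hkl,
            show resetA_go (e :: rest) (min j (max lefts 0)) lefts
              = "R" :: resetA_go rest (min j (max lefts 0)) lefts from by
                simp only [resetA_go]
                rw [if_neg (by simp only [not_and]; intro _; omega), if_pos h]]
          -- counter stays: at ¬ j < lefts, min j (max lefts 0) = min (j+1) (max lefts 0)?
          -- No: counter unchanged on the A-side, but fillL advances j. Both sides now
          -- recurse on rest; relate via ih at j+1 with equal counters.
          rw [show min j (max lefts 0) = min (j + 1) (max lefts 0) from by omega,
            ih (j + 1) (by omega)]
      · rw [show fillL (e :: rest) j lefts = e :: fillL rest j lefts from by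
            simp only [fillL]; rw [if_neg h],
          show resetA_go (e :: rest) (min j (max lefts 0)) lefts
              = e :: resetA_go rest (min j (max lefts 0)) lefts from by
            simp only [resetA_go]; rw [if_neg (by tauto), if_neg h],
          ih j hj]

-- B equals fillL (on the reversed list): if ys is processed front = rightmost
-- with `seen` slots already consumed, the result reversed is a left-to-right
-- fill with threshold seen + countSlotsB ys - rights.
theorem resetB_go_eq_fillL (ys : List String) :
    ∀ (seen rights : Int),
      (resetB_go ys seen rights).reverse =
        fillL ys.reverse 0 (seen + countSlotsB ys - rights) := by
  induction ys with
  | nil => intro seen rights; rfl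
  | cons e rest ih =>
      intro seen rights
      simp only [resetB_go, List.reverse_cons]
      by_cases h : (e == "L" || e == "R") = true
      · rw [if_pos h]
        have hc : countSlotsB (e :: rest) = 1 + countSlotsB rest := by
          simp [countSlotsB, h]
        simp only [List.reverse_cons, ih (seen + 1) rights, fillL_append,
          countSlotsB_reverse, hc]
        rw [show seen + (1 + countSlotsB rest) - rights
            = seen + 1 + countSlotsB rest - rights from by ring]
        congr 1
        simp only [fillL, zero_add]
        rw [if_pos h]
        by_cases hs : seen < rights
        · rw [if_pos hs, if_neg (by omega)]
        · rw [if_neg hs, if_pos (by omega)]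
      · rw [if_neg h]
        have hc : countSlotsB (e :: rest) = countSlotsB rest := by
          simp [countSlotsB, h]
        simp only [List.reverse_cons, ih seen rights, fillL_append,
          countSlotsB_reverse, hc]
        congr 1
        simp only [fillL, zero_add]
        rw [if_neg h]

-- ===== VERDICT (by name: the statement is the Claim_ definition above) =====
theorem reset_L_and_R_in_array_spec : Claim_equal_reset_L_and_R_in_array := by
  intro edges lefts _
  show reset_L_and_R_in_array edges lefts = reset_L_and_R_in_array_alt edges lefts
  unfold reset_L_and_R_in_array reset_L_and_R_in_array_alt
  rw [resetB_go_eq_fillL, List.reverse_reverse, countSlotsB_reverse]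
  have h0 : (0 : Int) + countSlotsB edges - (countSlotsB edges - lefts) = lefts := by ring
  rw [h0]
  have := resetA_go_eq_fillL edges lefts 0 le_rfl
  rw [show min (0:Int) (max lefts 0) = 0 from by omega] at this
  exact this
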